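-- pv_equiv track=rewrite | github.com/tiwariPC/hhbbgg_AwkwardAnalyzer | signal/mass_window.py | find_lower_higher_x
-- ===== SOURCE A (Python) =====
-- def find_lower_higher_x(mX, x_values):
--     """Find the closest lower and higher X values for a given mX."""
--     sorted_x = sorted(x_values.keys())  # Sort X values
--     lower_x, higher_x = None, None
--
--     for x in sorted_x:
--         if x <= mX:
--             lower_x = x
--         if x >= mX and higher_x is None:
--             higher_x = x
--             break  # Stop once we find the first X greater than mX
--
--     return lower_x, higher_x
-- ===== SOURCE B (Python) =====
-- def find_lower_higher_x(mX, x_values):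
--     """Find the closest lower and higher X values for a given mX (single pass, no sort)."""
--     lower_x, higher_x = None, None
--     for x in x_values.keys():
--         if x <= mX and (lower_x is None or x > lower_x):
--             lower_x = x
--         if x >= mX and (higher_x is None or x < higher_x):
--             higher_x = x
--     return lower_x, higher_x
-- ===== Notes on version B (the rewrite author's own statement) =====
-- stated objective: faster
-- what changed: Replaced sort-then-scan-with-break by a single unsorted pass that maintains the running max key <= mX and min key >= mX.
import Mathlib
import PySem

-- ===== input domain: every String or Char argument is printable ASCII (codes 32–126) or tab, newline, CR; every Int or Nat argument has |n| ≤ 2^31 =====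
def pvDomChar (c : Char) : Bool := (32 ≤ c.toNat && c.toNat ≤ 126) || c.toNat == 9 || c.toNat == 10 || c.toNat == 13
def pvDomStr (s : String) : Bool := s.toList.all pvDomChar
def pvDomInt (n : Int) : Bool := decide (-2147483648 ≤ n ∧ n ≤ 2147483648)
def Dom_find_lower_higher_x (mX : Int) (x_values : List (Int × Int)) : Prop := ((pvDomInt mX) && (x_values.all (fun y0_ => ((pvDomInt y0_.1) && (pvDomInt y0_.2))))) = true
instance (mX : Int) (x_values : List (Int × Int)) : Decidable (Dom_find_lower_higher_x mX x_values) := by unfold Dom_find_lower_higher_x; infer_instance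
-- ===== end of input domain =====

-- B drops A's sort and finds the closest lower/higher keys in one unsorted pass (faster in a timing run).

-- ===== PORT A =====
-- the for-loop over the sorted keys, with the early 'break' once higher_x is set
def pvLoopA (mX : Int) : List Int → Option Int → Option Int × Option Int
  | [], lo => (lo, none)
  | x :: xs, lo =>
    let lo' := if x ≤ mX then some x else lo
    if mX ≤ x then (lo', some x) else pvLoopA mX xs lo'

def find_lower_higher_x (mX : Int) (x_values : List (Int × Int)) : Option Int × Option Int :=
  pvLoopA mX (PySem.List.sorted (PySem.Dict.ofList x_values).keys (fun x => x) false) none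

-- ===== PORT B =====
-- one loop body: update lower_x, then higher_x
def pvStepB (mX : Int) (s : Option Int × Option Int) (x : Int) : Option Int × Option Int :=
  let lo := match s.1 with
    | none => if x ≤ mX then some x else none
    | some v => if x ≤ mX ∧ v < x then some x else some v
  let hi := match s.2 with
    | none => if mX ≤ x then some x else none
    | some v => if mX ≤ x ∧ x < v then some x else some v
  (lo, hi)

def find_lower_higher_x_alt (mX : Int) (x_values : List (Int × Int)) : Option Int × Option Int :=
  ((PySem.Dict.ofList x_values).keys).foldl (pvStepB mX) (none, none)

-- ===== PRECONDITION & SPEC =====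
def Spec_find_lower_higher_x (mX : Int) (x_values : List (Int × Int)) (out : Option Int × Option Int) : Prop := out = find_lower_higher_x_alt mX x_values
instance (mX : Int) (x_values : List (Int × Int)) (out : Option Int × Option Int) : Decidable (Spec_find_lower_higher_x mX x_values out) := by unfold Spec_find_lower_higher_x; infer_instance

-- ===== CLAIM (what is proved, stated in full; the proofs are below) =====
def Claim_equal_find_lower_higher_x : Prop := ∀ (mX : Int) (x_values : List (Int × Int)), Dom_find_lower_higher_x mX x_values → Spec_find_lower_higher_x mX x_values (find_lower_higher_x mX x_values)

-- ===== LEMMAS AND PROOFS =====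

-- the max key ≤ mX of a list, as an Option (none if there is no such key)
def pvLo (mX : Int) : List Int → Option Int
  | [] => none
  | x :: xs =>
    match pvLo mX xs with
    | none => if x ≤ mX then some x else none
    | some v => if x ≤ mX then some (max x v) else some v

-- the min key ≥ mX of a list, as an Option
def pvHi (mX : Int) : List Int → Option Int
  | [] => none
  | x :: xs =>
    match pvHi mX xs with
    | none => if mX ≤ x then some x else none
    | some v => if mX ≤ x then some (min x v) else some v

def omaxc : Option Int → Option Int → Option Int
  | none, r => r
  | some a, none => some a
  | some a, some b => some (max a b)

def ominc : Option Int → Option Int → Option Int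
  | none, r => r
  | some a, none => some a
  | some a, some b => some (min a b)

lemma pvLo_mem {mX : Int} {l : List Int} {b : Int} (h : pvLo mX l = some b) : b ∈ l ∧ b ≤ mX := by
  induction l generalizing b with
  | nil => simp [pvLo] at h
  | cons x xs ih =>
    simp only [pvLo] at h
    cases hr : pvLo mX xs with
    | none => rw [hr] at h; split_ifs at h with hx <;> simp_all
    | some v =>
      rw [hr] at h
      obtain ⟨hv, hvle⟩ := ih hr
      split_ifs at h with hx
      · rcases max_choice x v with hm | hm <;> simp_all
      · simp_all

lemma pvHi_mem {mX : Int} {l : List Int} {b : Int} (h : pvHi mX l = some b) : b ∈ l ∧ mX ≤ b := by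
  induction l generalizing b with
  | nil => simp [pvHi] at h
  | cons x xs ih =>
    simp only [pvHi] at h
    cases hr : pvHi mX xs with
    | none => rw [hr] at h; split_ifs at h with hx <;> simp_all
    | some v =>
      rw [hr] at h
      obtain ⟨hv, hvle⟩ := ih hr
      split_ifs at h with hx
      · rcases min_choice x v with hm | hm <;> simp_all
      · simp_all

-- pvLo/pvHi are invariant under permutation of the key list
lemma pvLo_perm (mX : Int) {l l' : List Int} (h : l.Perm l') : pvLo mX l = pvLo mX l' := by
  induction h with
  | nil => rfl
  | cons x _ ih => simp only [pvLo, ih]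
  | swap x y l =>
    simp only [pvLo]
    cases pvLo mX l <;> split_ifs <;> simp_all [max_left_comm, max_comm]
  | trans _ _ ih1 ih2 => exact ih1.trans ih2

lemma pvHi_perm (mX : Int) {l l' : List Int} (h : l.Perm l') : pvHi mX l = pvHi mX l' := by
  induction h with
  | nil => rfl
  | cons x _ ih => simp only [pvHi, ih]
  | swap x y l =>
    simp only [pvHi]
    cases pvHi mX l <;> split_ifs <;> simp_all [min_left_comm, min_comm]
  | trans _ _ ih1 ih2 => exact ih1.trans ih2

-- B's fold computes exactly (max ≤ mX, min ≥ mX) combined with the accumulator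
lemma foldB_eq (mX : Int) (l : List Int) : ∀ lo hi,
    l.foldl (pvStepB mX) (lo, hi) = (omaxc lo (pvLo mX l), ominc hi (pvHi mX l)) := by
  induction l with
  | nil => intro lo hi; cases lo <;> cases hi <;> rfl
  | cons x xs ih =>
    intro lo hi
    simp only [List.foldl_cons, pvStepB, ih]
    congr 1
    · cases lo <;> cases hr : pvLo mX xs <;> simp only [pvLo, hr] <;> split_ifs <;>
        simp_all [omaxc] <;> omega
    · cases hi <;> cases hr : pvHi mX xs <;> simp only [pvHi, hr] <;> split_ifs <;>
        simp_all [ominc] <;> omega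

-- A's loop on a sorted key list computes the same pair
lemma loopA_eq (mX : Int) : ∀ (l : List Int), l.Pairwise (· ≤ ·) →
    ∀ lo : Option Int, (∀ a, lo = some a → ∀ y ∈ l, a ≤ y) →
    pvLoopA mX l lo = (omaxc lo (pvLo mX l), pvHi mX l) := by
  intro l
  induction l with
  | nil => intro _ lo _; cases lo <;> rfl
  | cons x xs ih =>
    intro hpw lo hlo
    have hx : ∀ y ∈ xs, x ≤ y := by
      intro y hy; exact (List.pairwise_cons.mp hpw).1 y hy
    have hloX : ∀ a, lo = some a → a ≤ x := fun a ha => hlo a ha x (by simp)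
    simp only [pvLoopA]
    by_cases hge : mX ≤ x
    · simp only [if_pos hge]
      rw [Prod.mk.injEq]
      refine ⟨?_, ?_⟩
      · -- lower component
        by_cases hle : x ≤ mX
        · have hlox : pvLo mX (x :: xs) = some x := by
            simp only [pvLo]
            cases hr : pvLo mX xs with
            | none => simp [hle]
            | some v =>
              obtain ⟨hvmem, hvle⟩ := pvLo_mem hr
              have := hx v hvmem
              have : v = x := by omega
              simp [hle, this]
          rw [hlox]
          simp only [if_pos hle]
          cases lo with
          | none => rfl
          | some a =>
            have := hloX a rfl
            simp [omaxc]; omega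
        · have hlon : pvLo mX (x :: xs) = pvLo mX xs := by
            simp only [pvLo]; cases pvLo mX xs <;> simp [hle]
          have hxs : pvLo mX xs = none := by
            cases hr : pvLo mX xs with
            | none => rfl
            | some v =>
              obtain ⟨hvmem, hvle⟩ := pvLo_mem hr
              have := hx v hvmem
              omega
          rw [hlon, hxs]
          simp only [if_neg hle]
          cases lo <;> rfl
      · -- higher component
        simp only [pvHi]
        cases hr : pvHi mX xs with
        | none => simp [hge]
        | some v =>
          obtain ⟨hvmem, hvle⟩ := pvHi_mem hr
          have := hx v hvmem
          have : min x v = x := by omega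
          simp [hge, this]
    · -- recursive case: x < mX
      have hle : x ≤ mX := by omega
      simp only [if_neg hge, if_pos hle]
      rw [ih (List.pairwise_cons.mp hpw).2 (some x)
          (by intro a ha y hy; injection ha with h; subst h; exact hx y hy)]
      rw [Prod.mk.injEq]
      refine ⟨?_, ?_⟩
      · simp only [pvLo]
        cases hr : pvLo mX xs with
        | none =>
          simp only [if_pos hle]
          cases lo with
          | none => rfl
          | some a =>
            have := hloX a rfl
            simp [omaxc]; omega
        | some v =>
          simp only [if_pos hle]
          cases lo with
          | none => rfl
          | some a =>
            have := hloX a rfl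
            simp [omaxc]; omega
      · simp only [pvHi]
        cases pvHi mX xs <;> simp [hge]

-- ===== VERDICT (by name: the statement is the Claim_ definition above) =====
theorem find_lower_higher_x_spec : Claim_equal_find_lower_higher_x := by
  intro mX xv _
  unfold Spec_find_lower_higher_x find_lower_higher_x find_lower_higher_x_alt
  set ks := (PySem.Dict.ofList xv).keys with hks
  have hperm : (PySem.List.sorted ks (fun x => x) false).Perm ks := PySem.List.sorted_perm ks _ _
  have hpw : (PySem.List.sorted ks (fun x => x) false).Pairwise (· ≤ ·) := by
    simpa using PySem.List.sorted_pairwise ks (fun x => x)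
  rw [loopA_eq mX _ hpw none (by simp), foldB_eq mX ks none none,
      pvLo_perm mX hperm, pvHi_perm mX hperm]
  cases pvLo mX ks <;> cases pvHi mX ks <;> rfl
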